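-- pv_equiv track=rewrite | github.com/benseddikismail/naive-bayes-reviews-classifier | SeekTruth.py | word_frequencies
-- ===== SOURCE A (Python) =====
-- def word_frequencies(bag_of_words, reviews, labels):
--
--     word_freq_dict = {
--         # word1: [0,1,2,0,1,...]
--         # word2: [0,1,0,1,0,...]
--     }
--
--     truthful_freq_dict, deceptive_freq_dict = {}, {}
--
--     for review in bag_of_words:
--         for word in review:
--             word_freq_dict[word] = [0] * len(reviews)
--             truthful_freq_dict[word] = [0] * len(reviews)
--             deceptive_freq_dict[word] = [0] * len(reviews)
--
--     for i, review in enumerate(reviews):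
--         res = review.split()
--         for word in res:
--             word_freq_dict[word][i] += 1
--             if labels[i] == "truthful":
--                 truthful_freq_dict[word][i] += 1
--             else:
--                 deceptive_freq_dict[word][i] += 1
--
--     return (truthful_freq_dict, deceptive_freq_dict, word_freq_dict)
-- ===== SOURCE B (Python) =====
-- def word_frequencies(bag_of_words, reviews, labels):
--     # Phase 1: collect vocabulary (first-occurrence order) and run ONE counting pass.
--     words = []
--     seen = set()
--     for review in bag_of_words:
--         for w in review:
--             if w not in seen:
--                 seen.add(w)
--                 words.append(w)
--     n = len(reviews)
--     word_freq_dict = {w: [0] * n for w in words}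
--     for i, review in enumerate(reviews):
--         for w in review.split():
--             word_freq_dict[w][i] += 1
--     # Phase 2: derive the per-label dicts by masking each count row with the labels
--     # (a zero count needs no label: both masks are 0 there).
--     truthful_freq_dict = {}
--     deceptive_freq_dict = {}
--     for w, counts in word_freq_dict.items():
--         truthful_freq_dict[w] = [c if c and labels[i] == "truthful" else 0 for i, c in enumerate(counts)]
--         deceptive_freq_dict[w] = [c if c and labels[i] != "truthful" else 0 for i, c in enumerate(counts)]
--     return (truthful_freq_dict, deceptive_freq_dict, word_freq_dict)
-- ===== Notes on version B (the rewrite author's own statement) =====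
-- stated objective: faster
-- what changed: A maintains three dicts in one interleaved counting loop that branches on the label at every word occurrence and re-creates three [0]*len(reviews) rows for every (duplicate) word of bag_of_words; B is two-phase: it dedups the vocabulary once, runs one counting pass into the word-frequency dict alone, then derives the two per-label dicts by masking each count row with the labels (reading a label only where the count is non-zero, exactly where A read it).
import Mathlib
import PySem

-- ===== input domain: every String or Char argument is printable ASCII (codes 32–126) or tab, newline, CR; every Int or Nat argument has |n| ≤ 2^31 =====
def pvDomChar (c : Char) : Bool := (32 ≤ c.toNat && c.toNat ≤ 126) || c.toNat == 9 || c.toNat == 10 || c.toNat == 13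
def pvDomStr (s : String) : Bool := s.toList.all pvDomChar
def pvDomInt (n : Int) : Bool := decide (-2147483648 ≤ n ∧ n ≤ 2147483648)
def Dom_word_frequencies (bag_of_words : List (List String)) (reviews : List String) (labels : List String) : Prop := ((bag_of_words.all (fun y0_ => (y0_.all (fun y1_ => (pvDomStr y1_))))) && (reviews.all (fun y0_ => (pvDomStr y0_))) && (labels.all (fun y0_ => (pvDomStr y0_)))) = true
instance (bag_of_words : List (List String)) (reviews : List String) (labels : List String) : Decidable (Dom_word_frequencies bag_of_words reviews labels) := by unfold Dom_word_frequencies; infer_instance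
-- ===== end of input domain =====

-- B restructures A's single interleaved three-dict counting loop into two phases: one counting
-- pass that builds only the word-frequency dict (zero rows allocated once per distinct word,
-- not per occurrence), then a derive pass that masks each count row with the labels, reading
-- a label only where the count is non-zero (objective: faster, measured).

-- `d[w][i] += 1` (both Pythons contain this statement): a missing key is Python's KeyError,
-- excluded by Pre_ (no-op here).
def pvBump (d : PySem.Dict String (List Int)) (w : String) (i : Int) : PySem.Dict String (List Int) :=
  match d.get? w with
  | some l => d.insert w (PySem.List.pySetD l i (PySem.List.pyGetD l i 0 + 1))
  | none => d

-- ===== PORT A =====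
-- `labels[i]` is ported as pyGet?; inside Pre_ the index is in range whenever it is read (Python's IndexError is excluded by Pre_).
def word_frequencies (bag_of_words : List (List String)) (reviews : List String) (labels : List String) : (List (String × List Int)) × (List (String × List Int)) × (List (String × List Int)) :=
  let n := reviews.length
  -- first loop: zero lists into the three dicts, state (word_freq, truthful, deceptive)
  let init := bag_of_words.foldl (fun s review =>
      review.foldl (fun s w =>
        (s.1.insert w (List.replicate n (0:Int)),
         s.2.1.insert w (List.replicate n (0:Int)),
         s.2.2.insert w (List.replicate n (0:Int)))) s)
    ((PySem.Dict.empty : PySem.Dict String (List Int)), (PySem.Dict.empty : PySem.Dict String (List Int)), (PySem.Dict.empty : PySem.Dict String (List Int)))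
  -- second loop: count, branching on the label per word occurrence
  let fin := (PySem.List.enumerate reviews).foldl (fun s p =>
      (PySem.Str.split₀ p.2).foldl (fun s w =>
        let s := (pvBump s.1 w p.1, s.2.1, s.2.2)
        if PySem.List.pyGet? labels p.1 == some "truthful"
        then (s.1, pvBump s.2.1 w p.1, s.2.2)
        else (s.1, s.2.1, pvBump s.2.2 w p.1)) s) init
  (fin.2.1.items, fin.2.2.items, fin.1.items)

-- ===== PORT B =====
-- `[c if c and labels[i] == "truthful" else 0 for i, c in enumerate(counts)]`
-- (the label is read only when c is non-zero; inside Pre_ that index is then in range)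
def pvMaskT (labels : List String) (counts : List Int) : List Int :=
  (PySem.List.enumerate counts).map (fun p => if p.2 != 0 && (PySem.List.pyGet? labels p.1 == some "truthful") then p.2 else 0)

-- `[c if c and labels[i] != "truthful" else 0 for i, c in enumerate(counts)]`
def pvMaskD (labels : List String) (counts : List Int) : List Int :=
  (PySem.List.enumerate counts).map (fun p => if p.2 != 0 && !(PySem.List.pyGet? labels p.1 == some "truthful") then p.2 else 0)

def word_frequencies_alt (bag_of_words : List (List String)) (reviews : List String) (labels : List String) : (List (String × List Int)) × (List (String × List Int)) × (List (String × List Int)) :=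
  -- phase 1a: vocabulary in first-occurrence order (the seen-set + append loop)
  let words : List String := bag_of_words.foldl (fun acc review =>
      review.foldl (fun acc w => PySem.Set.add acc w) acc) []
  let n := reviews.length
  -- phase 1b: zero dict, then the single counting pass
  let wf0 := words.foldl (fun d w => d.insert w (List.replicate n (0:Int))) (PySem.Dict.empty : PySem.Dict String (List Int))
  let wf := (PySem.List.enumerate reviews).foldl (fun d p =>
      (PySem.Str.split₀ p.2).foldl (fun d w => pvBump d w p.1) d) wf0
  -- phase 2: derive the per-label dicts by masking each count row (distinct keys, in order)
  (wf.items.map (fun p => (p.1, pvMaskT labels p.2)),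
   wf.items.map (fun p => (p.1, pvMaskD labels p.2)),
   wf.items)

-- ===== PRECONDITION & SPEC =====
-- Pre_ excludes exactly the inputs on which A raises: a review word absent from bag_of_words
-- (KeyError), or a non-empty review whose index has no label (IndexError).
def Pre_word_frequencies (bag_of_words : List (List String)) (reviews : List String) (labels : List String) : Prop :=
  ∀ p ∈ PySem.List.enumerate reviews,
    (PySem.Str.split₀ p.2 ≠ [] → p.1 < (labels.length : Int)) ∧
    ∀ w ∈ PySem.Str.split₀ p.2, w ∈ bag_of_words.flatten
instance (bag_of_words : List (List String)) (reviews : List String) (labels : List String) : Decidable (Pre_word_frequencies bag_of_words reviews labels) := by unfold Pre_word_frequencies; infer_instance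

def pvWitness_word_frequencies : List (List String) × List String × List String :=
  ([["a", "b"]], ["a b a", "b"], ["truthful", "deceptive"])

def Spec_word_frequencies (bag_of_words : List (List String)) (reviews : List String) (labels : List String) (out : (List (String × List Int)) × (List (String × List Int)) × (List (String × List Int))) : Prop := out = word_frequencies_alt bag_of_words reviews labels
instance (bag_of_words : List (List String)) (reviews : List String) (labels : List String) (out : (List (String × List Int)) × (List (String × List Int)) × (List (String × List Int))) : Decidable (Spec_word_frequencies bag_of_words reviews labels out) := by unfold Spec_word_frequencies; infer_instance

-- ===== CLAIM (what is proved, stated in full; the proofs are below) =====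
def Claim_equal_word_frequencies : Prop := ∀ (bag_of_words : List (List String)) (reviews : List String) (labels : List String), Dom_word_frequencies bag_of_words reviews labels → Pre_word_frequencies bag_of_words reviews labels → Spec_word_frequencies bag_of_words reviews labels (word_frequencies bag_of_words reviews labels)

-- ===== LEMMAS AND PROOFS =====

-- the zero dict over a key list, as a literal item list
def pvZD (n : Nat) (ws : List String) : PySem.Dict String (List Int) :=
  PySem.Dict.mk (ws.map (fun w => (w, List.replicate n (0:Int))))

-- the label masks lifted to whole dicts
def pvMT (labels : List String) (d : PySem.Dict String (List Int)) : PySem.Dict String (List Int) :=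
  PySem.Dict.mk (d.items.map (fun p => (p.1, pvMaskT labels p.2)))
def pvMD (labels : List String) (d : PySem.Dict String (List Int)) : PySem.Dict String (List Int) :=
  PySem.Dict.mk (d.items.map (fun p => (p.1, pvMaskD labels p.2)))

-- all stored count rows are nonnegative (invariant of the counting pass)
def pvNN (d : PySem.Dict String (List Int)) : Prop :=
  ∀ p ∈ d.items, ∀ x ∈ p.2, 0 ≤ x

theorem pvZD_insert (n : Nat) (ws : List String) (w : String) :
    (pvZD n ws).insert w (List.replicate n (0:Int)) = pvZD n (PySem.Set.add ws w) := by
  by_cases h : w ∈ ws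
  · simp [PySem.Dict.insert, PySem.Dict.contains, PySem.Set.add, PySem.Set.contains, pvZD,
      List.any_map, h]
    intro a _ e
    exact e.symm
  · simp [PySem.Dict.insert, PySem.Dict.contains, PySem.Set.add, PySem.Set.contains, pvZD,
      List.any_map, h]

theorem pvZD_foldl (n : Nat) (l : List String) (ws : List String) :
    l.foldl (fun d w => d.insert w (List.replicate n (0:Int))) (pvZD n ws)
      = pvZD n (l.foldl PySem.Set.add ws) := by
  induction l generalizing ws with
  | nil => rfl
  | cons x l ih => simp only [List.foldl_cons, pvZD_insert]; exact ih _

theorem pvMaskT_length (labels : List String) (l : List Int) : (pvMaskT labels l).length = l.length := by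
  simp [pvMaskT, PySem.List.length_enumerate]

theorem pvMaskD_length (labels : List String) (l : List Int) : (pvMaskD labels l).length = l.length := by
  simp [pvMaskD, PySem.List.length_enumerate]

theorem pvMaskT_getElem (labels : List String) (l : List Int) (j : Nat) (h : j < (pvMaskT labels l).length) :
    (pvMaskT labels l)[j] = if (l[j]'(by simpa [pvMaskT_length] using h)) != 0 && (PySem.List.pyGet? labels (j : Int) == some "truthful") then l[j]'(by simpa [pvMaskT_length] using h) else 0 := by
  have hj : j < (PySem.List.enumerate l 0).length := by
    simpa [PySem.List.length_enumerate] using (pvMaskT_length labels l ▸ h)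
  simp [pvMaskT, List.getElem_map, PySem.List.getElem_enumerate l 0 j hj]

theorem pvMaskD_getElem (labels : List String) (l : List Int) (j : Nat) (h : j < (pvMaskD labels l).length) :
    (pvMaskD labels l)[j] = if (l[j]'(by simpa [pvMaskD_length] using h)) != 0 && !(PySem.List.pyGet? labels (j : Int) == some "truthful") then l[j]'(by simpa [pvMaskD_length] using h) else 0 := by
  have hj : j < (PySem.List.enumerate l 0).length := by
    simpa [PySem.List.length_enumerate] using (pvMaskD_length labels l ▸ h)
  simp [pvMaskD, List.getElem_map, PySem.List.getElem_enumerate l 0 j hj]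

theorem pvMaskT_replicate (labels : List String) (n : Nat) :
    pvMaskT labels (List.replicate n (0:Int)) = List.replicate n (0:Int) := by
  apply List.ext_getElem
  · simp [pvMaskT_length]
  · intro j h1 h2
    rw [pvMaskT_getElem]
    simp

theorem pvMaskD_replicate (labels : List String) (n : Nat) :
    pvMaskD labels (List.replicate n (0:Int)) = List.replicate n (0:Int) := by
  apply List.ext_getElem
  · simp [pvMaskD_length]
  · intro j h1 h2
    rw [pvMaskD_getElem]
    simp

theorem pvMT_pvZD (labels : List String) (n : Nat) (ws : List String) : pvMT labels (pvZD n ws) = pvZD n ws := by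
  simp [pvMT, pvZD, List.map_map, Function.comp, pvMaskT_replicate]

theorem pvMD_pvZD (labels : List String) (n : Nat) (ws : List String) : pvMD labels (pvZD n ws) = pvZD n ws := by
  simp [pvMD, pvZD, List.map_map, Function.comp, pvMaskD_replicate]

theorem get?_pvMT (labels : List String) (d : PySem.Dict String (List Int)) (w : String) :
    (pvMT labels d).get? w = (d.get? w).map (pvMaskT labels) := by
  simp only [pvMT, PySem.Dict.get?, List.find?_map, Option.map_map]
  rfl

theorem get?_pvMD (labels : List String) (d : PySem.Dict String (List Int)) (w : String) :
    (pvMD labels d).get? w = (d.get? w).map (pvMaskD labels) := by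
  simp only [pvMD, PySem.Dict.get?, List.find?_map, Option.map_map]
  rfl

theorem contains_pvMT (labels : List String) (d : PySem.Dict String (List Int)) (w : String) :
    (pvMT labels d).contains w = d.contains w := by
  simp only [pvMT, PySem.Dict.contains_mk, List.any_map]
  rfl

theorem contains_pvMD (labels : List String) (d : PySem.Dict String (List Int)) (w : String) :
    (pvMD labels d).contains w = d.contains w := by
  simp only [pvMD, PySem.Dict.contains_mk, List.any_map]
  rfl

theorem pvMT_insert (labels : List String) (d : PySem.Dict String (List Int)) (w : String) (v : List Int) :
    pvMT labels (d.insert w v) = (pvMT labels d).insert w (pvMaskT labels v) := by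
  apply PySem.Dict.ext
  by_cases h : d.contains w = true
  · rw [show pvMT labels (d.insert w v) = PySem.Dict.mk ((d.insert w v).items.map (fun p => (p.1, pvMaskT labels p.2))) from rfl]
    rw [PySem.Dict.items_insert_of_contains d v h,
        PySem.Dict.items_insert_of_contains (pvMT labels d) (pvMaskT labels v) ((contains_pvMT labels d w).trans h)]
    simp only [pvMT, List.map_map]
    apply List.map_congr_left
    intro p _
    by_cases hp : p.1 = w <;> simp [Function.comp, hp]
  · have h' : d.contains w = false := by simpa using h
    rw [show pvMT labels (d.insert w v) = PySem.Dict.mk ((d.insert w v).items.map (fun p => (p.1, pvMaskT labels p.2))) from rfl]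
    rw [PySem.Dict.items_insert_of_not_contains d v h',
        PySem.Dict.items_insert_of_not_contains (pvMT labels d) (pvMaskT labels v) ((contains_pvMT labels d w).trans h')]
    simp [pvMT]

theorem pvMD_insert (labels : List String) (d : PySem.Dict String (List Int)) (w : String) (v : List Int) :
    pvMD labels (d.insert w v) = (pvMD labels d).insert w (pvMaskD labels v) := by
  apply PySem.Dict.ext
  by_cases h : d.contains w = true
  · rw [show pvMD labels (d.insert w v) = PySem.Dict.mk ((d.insert w v).items.map (fun p => (p.1, pvMaskD labels p.2))) from rfl]
    rw [PySem.Dict.items_insert_of_contains d v h,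
        PySem.Dict.items_insert_of_contains (pvMD labels d) (pvMaskD labels v) ((contains_pvMD labels d w).trans h)]
    simp only [pvMD, List.map_map]
    apply List.map_congr_left
    intro p _
    by_cases hp : p.1 = w <;> simp [Function.comp, hp]
  · have h' : d.contains w = false := by simpa using h
    rw [show pvMD labels (d.insert w v) = PySem.Dict.mk ((d.insert w v).items.map (fun p => (p.1, pvMaskD labels p.2))) from rfl]
    rw [PySem.Dict.items_insert_of_not_contains d v h',
        PySem.Dict.items_insert_of_not_contains (pvMD labels d) (pvMaskD labels v) ((contains_pvMD labels d w).trans h')]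
    simp [pvMD]

theorem pvMaskT_bump_true (labels : List String) (l : List Int) (i : Int) (hi : 0 ≤ i)
    (hnn : ∀ x ∈ l, 0 ≤ x)
    (hc : (PySem.List.pyGet? labels i == some "truthful") = true) :
    pvMaskT labels (PySem.List.pySetD l i (PySem.List.pyGetD l i 0 + 1))
      = PySem.List.pySetD (pvMaskT labels l) i (PySem.List.pyGetD (pvMaskT labels l) i 0 + 1) := by
  have hik : (i.toNat : Int) = i := Int.toNat_of_nonneg hi
  have hceq : PySem.List.pyGet? labels i = some "truthful" := by simpa using hc
  rw [PySem.List.pySetD_of_nonneg _ _ hi, PySem.List.pySetD_of_nonneg _ _ hi,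
      PySem.List.pyGetD_of_nonneg _ _ hi, PySem.List.pyGetD_of_nonneg _ _ hi]
  apply List.ext_getElem
  · simp [pvMaskT_length]
  · intro j h1 h2
    have hjl : j < l.length := by simpa [pvMaskT_length] using h1
    rw [pvMaskT_getElem, List.getElem_set]
    by_cases hj : i.toNat = j
    · subst hj
      rw [List.getElem_set_self]
      have hjl2 : i.toNat < (pvMaskT labels l).length := by simpa [pvMaskT_length] using hjl
      have hge : (0:Int) ≤ l[i.toNat] := hnn _ (List.getElem_mem hjl)
      have hne : (l[i.toNat] + 1 != 0) = true := by simp; omega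
      simp only [hik, hceq, if_true]
      have d1 : l.getD i.toNat 0 = l[i.toNat] := List.getD_eq_getElem l 0 hjl
      have d2 : (pvMaskT labels l).getD i.toNat 0 = (pvMaskT labels l)[i.toNat]'hjl2 := List.getD_eq_getElem (pvMaskT labels l) 0 hjl2
      rw [d1, d2, pvMaskT_getElem labels l i.toNat hjl2, hik, hceq]
      split_ifs <;> simp_all
    · rw [List.getElem_set_ne hj]
      simp [hj, pvMaskT_getElem, PySem.List.pyGet?_natCast]

theorem pvMaskT_bump_false (labels : List String) (l : List Int) (i : Int) (hi : 0 ≤ i)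
    (hc : (PySem.List.pyGet? labels i == some "truthful") = false) :
    pvMaskT labels (PySem.List.pySetD l i (PySem.List.pyGetD l i 0 + 1)) = pvMaskT labels l := by
  have hik : (i.toNat : Int) = i := Int.toNat_of_nonneg hi
  have hceq : ¬ PySem.List.pyGet? labels i = some "truthful" := by simpa using hc
  rw [PySem.List.pySetD_of_nonneg _ _ hi]
  apply List.ext_getElem
  · simp [pvMaskT_length]
  · intro j h1 h2
    rw [pvMaskT_getElem, pvMaskT_getElem, List.getElem_set]
    by_cases hj : i.toNat = j
    · subst hj
      simp [hik, hceq]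
    · simp [hj]

theorem pvMaskD_bump_false (labels : List String) (l : List Int) (i : Int) (hi : 0 ≤ i)
    (hnn : ∀ x ∈ l, 0 ≤ x)
    (hc : (PySem.List.pyGet? labels i == some "truthful") = false) :
    pvMaskD labels (PySem.List.pySetD l i (PySem.List.pyGetD l i 0 + 1))
      = PySem.List.pySetD (pvMaskD labels l) i (PySem.List.pyGetD (pvMaskD labels l) i 0 + 1) := by
  have hik : (i.toNat : Int) = i := Int.toNat_of_nonneg hi
  have hceq : ¬ PySem.List.pyGet? labels i = some "truthful" := by simpa using hc
  rw [PySem.List.pySetD_of_nonneg _ _ hi, PySem.List.pySetD_of_nonneg _ _ hi,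
      PySem.List.pyGetD_of_nonneg _ _ hi, PySem.List.pyGetD_of_nonneg _ _ hi]
  apply List.ext_getElem
  · simp [pvMaskD_length]
  · intro j h1 h2
    have hjl : j < l.length := by simpa [pvMaskD_length] using h1
    rw [pvMaskD_getElem, List.getElem_set]
    by_cases hj : i.toNat = j
    · subst hj
      rw [List.getElem_set_self]
      have hjl2 : i.toNat < (pvMaskD labels l).length := by simpa [pvMaskD_length] using hjl
      have hge : (0:Int) ≤ l[i.toNat] := hnn _ (List.getElem_mem hjl)
      have hne : (l[i.toNat] + 1 != 0) = true := by simp; omega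
      simp only [hik, hc, if_true]
      have d1 : l.getD i.toNat 0 = l[i.toNat] := List.getD_eq_getElem l 0 hjl
      have d2 : (pvMaskD labels l).getD i.toNat 0 = (pvMaskD labels l)[i.toNat]'hjl2 := List.getD_eq_getElem (pvMaskD labels l) 0 hjl2
      rw [d1, d2, pvMaskD_getElem labels l i.toNat hjl2, hik, hc]
      split_ifs <;> simp_all
    · rw [List.getElem_set_ne hj]
      simp [hj, pvMaskD_getElem, PySem.List.pyGet?_natCast]

theorem pvMaskD_bump_true (labels : List String) (l : List Int) (i : Int) (hi : 0 ≤ i)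
    (hc : (PySem.List.pyGet? labels i == some "truthful") = true) :
    pvMaskD labels (PySem.List.pySetD l i (PySem.List.pyGetD l i 0 + 1)) = pvMaskD labels l := by
  have hik : (i.toNat : Int) = i := Int.toNat_of_nonneg hi
  have hceq : PySem.List.pyGet? labels i = some "truthful" := by simpa using hc
  rw [PySem.List.pySetD_of_nonneg _ _ hi]
  apply List.ext_getElem
  · simp [pvMaskD_length]
  · intro j h1 h2
    rw [pvMaskD_getElem, pvMaskD_getElem, List.getElem_set]
    by_cases hj : i.toNat = j
    · subst hj
      simp [hik, hceq]
    · simp [hj]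

theorem insert_eq_self_of_get? (d : PySem.Dict String (List Int)) (w : String) (v : List Int)
    (hnd : (d.items.map Prod.fst).Nodup) (h : d.get? w = some v) : d.insert w v = d := by
  simp only [PySem.Dict.get?, Option.map_eq_some_iff] at h
  obtain ⟨q, hq, hqv⟩ := h
  have hqmem := List.mem_of_find?_eq_some hq
  have hqw : q.1 = w := by
    have := List.find?_some hq
    simpa using this
  have hc : d.contains w = true := by
    simp only [PySem.Dict.contains, List.any_eq_true]
    exact ⟨q, hqmem, by simp [hqw]⟩
  apply PySem.Dict.ext
  rw [PySem.Dict.items_insert_of_contains d v hc]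
  conv_rhs => rw [← List.map_id d.items]
  apply List.map_congr_left
  intro p hp
  by_cases hpw : p.1 = w
  · have hpq : p = q := List.inj_on_of_nodup_map hnd hp hqmem (by rw [hpw, hqw])
    simp only [beq_self_eq_true, if_true, id_eq, hpq, ← hqv, ← hqw]
  · simp [hpw]

theorem get?_nonneg (d : PySem.Dict String (List Int)) (w : String) (l : List Int)
    (hd : pvNN d) (hg : d.get? w = some l) : ∀ x ∈ l, 0 ≤ x := by
  simp only [PySem.Dict.get?, Option.map_eq_some_iff] at hg
  obtain ⟨q, hq, hqv⟩ := hg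
  intro x hx
  exact hd q (List.mem_of_find?_eq_some hq) x (hqv ▸ hx)

theorem pyGetD0_nonneg (l : List Int) (i : Int) (hi : 0 ≤ i) (hnn : ∀ x ∈ l, 0 ≤ x) :
    0 ≤ PySem.List.pyGetD l i 0 := by
  rw [PySem.List.pyGetD_of_nonneg _ _ hi]
  by_cases hr : i.toNat < l.length
  · rw [List.getD_eq_getElem l 0 hr]
    exact hnn _ (List.getElem_mem hr)
  · rw [List.getD_eq_default l 0 (by omega)]

theorem pvNN_pvBump (d : PySem.Dict String (List Int)) (w : String) (i : Int) (hi : 0 ≤ i)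
    (hd : pvNN d) : pvNN (pvBump d w i) := by
  unfold pvBump
  cases hg : d.get? w with
  | none => exact hd
  | some l =>
    have hl := get?_nonneg d w l hd hg
    intro p hp x hx
    rw [PySem.Dict.mem_items_insert] at hp
    rcases hp with rfl | ⟨hp, _⟩
    · rw [PySem.List.pySetD_of_nonneg _ _ hi] at hx
      rcases List.mem_or_eq_of_mem_set hx with hmem | rfl
      · exact hl x hmem
      · have := pyGetD0_nonneg l i hi hl
        omega
    · exact hd p hp x hx

theorem pvNN_foldl_pvBump (ws : List String) (i : Int) (hi : 0 ≤ i)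
    (wf : PySem.Dict String (List Int)) (hd : pvNN wf) :
    pvNN (ws.foldl (fun d w => pvBump d w i) wf) := by
  induction ws generalizing wf with
  | nil => exact hd
  | cons x ws ih => exact ih _ (pvNN_pvBump wf x i hi hd)

theorem keys_pvBump (d : PySem.Dict String (List Int)) (w : String) (i : Int) :
    ((pvBump d w i).items.map Prod.fst) = d.items.map Prod.fst := by
  unfold pvBump
  cases hg : d.get? w with
  | none => rfl
  | some l =>
    have hc : d.contains w = true := by
      simp only [PySem.Dict.get?, Option.map_eq_some_iff] at hg
      obtain ⟨q, hq, hqv⟩ := hg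
      have hqw : q.1 = w := by simpa using List.find?_some hq
      simp only [PySem.Dict.contains, List.any_eq_true]
      exact ⟨q, List.mem_of_find?_eq_some hq, by simp [hqw]⟩
    rw [PySem.Dict.items_insert_of_contains d _ hc, List.map_map]
    apply List.map_congr_left
    intro p _
    by_cases hp : p.1 = w <;> simp [Function.comp, hp]

theorem pvMT_pvBump_true (labels : List String) (d : PySem.Dict String (List Int)) (w : String) (i : Int)
    (hi : 0 ≤ i) (hd : pvNN d) (hc : (PySem.List.pyGet? labels i == some "truthful") = true) :
    pvMT labels (pvBump d w i) = pvBump (pvMT labels d) w i := by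
  unfold pvBump
  rw [get?_pvMT]
  cases hg : d.get? w with
  | none => rfl
  | some l =>
    simp only [Option.map_some]
    rw [pvMT_insert, pvMaskT_bump_true labels l i hi (get?_nonneg d w l hd hg) hc]

theorem pvMT_pvBump_false (labels : List String) (d : PySem.Dict String (List Int)) (w : String) (i : Int)
    (hi : 0 ≤ i) (hnd : (d.items.map Prod.fst).Nodup)
    (hc : (PySem.List.pyGet? labels i == some "truthful") = false) :
    pvMT labels (pvBump d w i) = pvMT labels d := by
  unfold pvBump
  cases hg : d.get? w with
  | none => rfl
  | some l =>
    rw [pvMT_insert, pvMaskT_bump_false labels l i hi hc]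
    apply insert_eq_self_of_get?
    · rw [show (pvMT labels d).items.map Prod.fst = d.items.map Prod.fst from by
        simp only [pvMT, List.map_map]; rfl]
      exact hnd
    · rw [get?_pvMT, hg]
      rfl

theorem pvMD_pvBump_false (labels : List String) (d : PySem.Dict String (List Int)) (w : String) (i : Int)
    (hi : 0 ≤ i) (hd : pvNN d) (hc : (PySem.List.pyGet? labels i == some "truthful") = false) :
    pvMD labels (pvBump d w i) = pvBump (pvMD labels d) w i := by
  unfold pvBump
  rw [get?_pvMD]
  cases hg : d.get? w with
  | none => rfl
  | some l =>
    simp only [Option.map_some]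
    rw [pvMD_insert, pvMaskD_bump_false labels l i hi (get?_nonneg d w l hd hg) hc]

theorem pvMD_pvBump_true (labels : List String) (d : PySem.Dict String (List Int)) (w : String) (i : Int)
    (hi : 0 ≤ i) (hnd : (d.items.map Prod.fst).Nodup)
    (hc : (PySem.List.pyGet? labels i == some "truthful") = true) :
    pvMD labels (pvBump d w i) = pvMD labels d := by
  unfold pvBump
  cases hg : d.get? w with
  | none => rfl
  | some l =>
    rw [pvMD_insert, pvMaskD_bump_true labels l i hi hc]
    apply insert_eq_self_of_get?
    · rw [show (pvMD labels d).items.map Prod.fst = d.items.map Prod.fst from by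
        simp only [pvMD, List.map_map]; rfl]
      exact hnd
    · rw [get?_pvMD, hg]
      rfl

theorem keys_foldl_pvBump (ws : List String) (i : Int) (wf : PySem.Dict String (List Int)) :
    ((ws.foldl (fun d w => pvBump d w i) wf).items.map Prod.fst) = wf.items.map Prod.fst := by
  induction ws generalizing wf with
  | nil => rfl
  | cons x ws ih => rw [List.foldl_cons, ih, keys_pvBump]

theorem mainInnerTrue (labels : List String) (ws : List String) (i : Int) (hi : 0 ≤ i)
    (hc : (PySem.List.pyGet? labels i == some "truthful") = true)
    (wf : PySem.Dict String (List Int)) (hnd : (wf.items.map Prod.fst).Nodup) (hnn : pvNN wf) :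
    ws.foldl (fun s w => (pvBump s.1 w i, pvBump s.2.1 w i, s.2.2)) (wf, pvMT labels wf, pvMD labels wf)
      = (ws.foldl (fun d w => pvBump d w i) wf,
         pvMT labels (ws.foldl (fun d w => pvBump d w i) wf),
         pvMD labels (ws.foldl (fun d w => pvBump d w i) wf)) := by
  induction ws generalizing wf with
  | nil => rfl
  | cons x ws ih =>
    simp only [List.foldl_cons]
    rw [show (pvBump wf x i, pvBump (pvMT labels wf) x i, pvMD labels wf)
        = (pvBump wf x i, pvMT labels (pvBump wf x i), pvMD labels (pvBump wf x i)) from by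
      rw [pvMT_pvBump_true labels wf x i hi hnn hc, pvMD_pvBump_true labels wf x i hi hnd hc]]
    exact ih _ (by rw [keys_pvBump]; exact hnd) (pvNN_pvBump wf x i hi hnn)

theorem mainInnerFalse (labels : List String) (ws : List String) (i : Int) (hi : 0 ≤ i)
    (hc : (PySem.List.pyGet? labels i == some "truthful") = false)
    (wf : PySem.Dict String (List Int)) (hnd : (wf.items.map Prod.fst).Nodup) (hnn : pvNN wf) :
    ws.foldl (fun s w => (pvBump s.1 w i, s.2.1, pvBump s.2.2 w i)) (wf, pvMT labels wf, pvMD labels wf)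
      = (ws.foldl (fun d w => pvBump d w i) wf,
         pvMT labels (ws.foldl (fun d w => pvBump d w i) wf),
         pvMD labels (ws.foldl (fun d w => pvBump d w i) wf)) := by
  induction ws generalizing wf with
  | nil => rfl
  | cons x ws ih =>
    simp only [List.foldl_cons]
    rw [show (pvBump wf x i, pvMT labels wf, pvBump (pvMD labels wf) x i)
        = (pvBump wf x i, pvMT labels (pvBump wf x i), pvMD labels (pvBump wf x i)) from by
      rw [pvMT_pvBump_false labels wf x i hi hnd hc, pvMD_pvBump_false labels wf x i hi hnn hc]]
    exact ih _ (by rw [keys_pvBump]; exact hnd) (pvNN_pvBump wf x i hi hnn)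

theorem mainInner (labels : List String) (ws : List String) (i : Int) (hi : 0 ≤ i)
    (wf : PySem.Dict String (List Int)) (hnd : (wf.items.map Prod.fst).Nodup) (hnn : pvNN wf) :
    ws.foldl (fun s w =>
        let s := (pvBump s.1 w i, s.2.1, s.2.2)
        if PySem.List.pyGet? labels i == some "truthful"
        then (s.1, pvBump s.2.1 w i, s.2.2)
        else (s.1, s.2.1, pvBump s.2.2 w i)) (wf, pvMT labels wf, pvMD labels wf)
      = (ws.foldl (fun d w => pvBump d w i) wf,
         pvMT labels (ws.foldl (fun d w => pvBump d w i) wf),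
         pvMD labels (ws.foldl (fun d w => pvBump d w i) wf)) := by
  cases hcond : (PySem.List.pyGet? labels i == some "truthful") with
  | true =>
    have := mainInnerTrue labels ws i hi hcond wf hnd hnn
    simpa only [hcond, if_true] using this
  | false =>
    have := mainInnerFalse labels ws i hi hcond wf hnd hnn
    simpa only [hcond, Bool.false_eq_true, if_false] using this

theorem mainOuter (labels : List String) (ps : List (Int × String)) (hpos : ∀ p ∈ ps, 0 ≤ p.1)
    (wf : PySem.Dict String (List Int)) (hnd : (wf.items.map Prod.fst).Nodup) (hnn : pvNN wf) :
    ps.foldl (fun s p =>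
        (PySem.Str.split₀ p.2).foldl (fun s w =>
          let s := (pvBump s.1 w p.1, s.2.1, s.2.2)
          if PySem.List.pyGet? labels p.1 == some "truthful"
          then (s.1, pvBump s.2.1 w p.1, s.2.2)
          else (s.1, s.2.1, pvBump s.2.2 w p.1)) s) (wf, pvMT labels wf, pvMD labels wf)
      = (ps.foldl (fun d p => (PySem.Str.split₀ p.2).foldl (fun d w => pvBump d w p.1) d) wf,
         pvMT labels (ps.foldl (fun d p => (PySem.Str.split₀ p.2).foldl (fun d w => pvBump d w p.1) d) wf),
         pvMD labels (ps.foldl (fun d p => (PySem.Str.split₀ p.2).foldl (fun d w => pvBump d w p.1) d) wf)) := by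
  induction ps generalizing wf with
  | nil => rfl
  | cons p ps ih =>
    simp only [List.foldl_cons]
    rw [mainInner labels (PySem.Str.split₀ p.2) p.1 (hpos p (List.mem_cons_self)) wf hnd hnn]
    exact ih (fun q hq => hpos q (List.mem_cons_of_mem _ hq)) _
      (by rw [keys_foldl_pvBump]; exact hnd)
      (pvNN_foldl_pvBump _ _ (hpos p (List.mem_cons_self)) _ hnn)

theorem tripleInitInner (review : List String) (n : Nat)
    (a b c : PySem.Dict String (List Int)) :
    review.foldl (fun s w =>
        (s.1.insert w (List.replicate n (0:Int)),
         s.2.1.insert w (List.replicate n (0:Int)),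
         s.2.2.insert w (List.replicate n (0:Int)))) (a, b, c)
      = (review.foldl (fun d w => d.insert w (List.replicate n (0:Int))) a,
         review.foldl (fun d w => d.insert w (List.replicate n (0:Int))) b,
         review.foldl (fun d w => d.insert w (List.replicate n (0:Int))) c) := by
  induction review generalizing a b c with
  | nil => rfl
  | cons x review ih => simp only [List.foldl_cons]; exact ih _ _ _

theorem tripleInit (bag : List (List String)) (n : Nat) (ws : List String) :
    bag.foldl (fun s review =>
        review.foldl (fun s w =>
          (s.1.insert w (List.replicate n (0:Int)),
           s.2.1.insert w (List.replicate n (0:Int)),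
           s.2.2.insert w (List.replicate n (0:Int)))) s) (pvZD n ws, pvZD n ws, pvZD n ws)
      = (pvZD n (bag.foldl (fun acc review => review.foldl PySem.Set.add acc) ws),
         pvZD n (bag.foldl (fun acc review => review.foldl PySem.Set.add acc) ws),
         pvZD n (bag.foldl (fun acc review => review.foldl PySem.Set.add acc) ws)) := by
  induction bag generalizing ws with
  | nil => rfl
  | cons review bag ih =>
    simp only [List.foldl_cons]
    rw [tripleInitInner, pvZD_foldl]
    exact ih _

theorem pvZD_empty (n : Nat) : (PySem.Dict.empty : PySem.Dict String (List Int)) = pvZD n [] := rfl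

theorem keys_pvZD (n : Nat) (ws : List String) : (pvZD n ws).items.map Prod.fst = ws := by
  simp only [pvZD, List.map_map]
  exact List.map_id' ws

theorem pvNN_pvZD (n : Nat) (ws : List String) : pvNN (pvZD n ws) := by
  intro p hp x hx
  simp only [pvZD, List.mem_map] at hp
  obtain ⟨w, _, rfl⟩ := hp
  simp only [List.mem_replicate] at hx
  omega

-- ===== VERDICT (by name: the statement is the Claim_ definition above) =====
theorem word_frequencies_spec : Claim_equal_word_frequencies := by
  unfold Claim_equal_word_frequencies
  intro bag_of_words reviews labels hdom hpre
  unfold Spec_word_frequencies word_frequencies word_frequencies_alt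
  dsimp only
  set W := List.foldl (fun acc review => List.foldl (fun acc w => PySem.Set.add acc w) acc review) ([] : List String) bag_of_words with hWdef
  set n := reviews.length with hndef
  -- the vocabulary is a Python set's list: distinct
  have hW : W = PySem.Set.ofList bag_of_words.flatten := by
    rw [hWdef, PySem.Set.ofList_eq_foldl, List.foldl_flatten]
  have hWnd : W.Nodup := by rw [hW]; exact PySem.Set.nodup_ofList _
  -- A's init loop builds the zero dict over W, three times
  have hinit : List.foldl (fun s review =>
        List.foldl (fun s w =>
          (s.1.insert w (List.replicate n (0:Int)),
           s.2.1.insert w (List.replicate n (0:Int)),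
           s.2.2.insert w (List.replicate n (0:Int)))) s review)
      ((PySem.Dict.empty : PySem.Dict String (List Int)), (PySem.Dict.empty : PySem.Dict String (List Int)), (PySem.Dict.empty : PySem.Dict String (List Int))) bag_of_words
      = (pvZD n W, pvZD n W, pvZD n W) := by
    rw [pvZD_empty n, tripleInit bag_of_words n []]
  -- B's zero dict is the same dict
  have hwf0 : List.foldl (fun d w => d.insert w (List.replicate n (0:Int)))
      (PySem.Dict.empty : PySem.Dict String (List Int)) W = pvZD n W := by
    rw [pvZD_empty n, pvZD_foldl n W []]
    congr 1
    rw [← PySem.Set.ofList_eq_foldl, hW]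
    exact PySem.Set.ofList_eq_self_of_nodup _ (hW ▸ hWnd)
  have hnd : ((pvZD n W).items.map Prod.fst).Nodup := by rw [keys_pvZD]; exact hWnd
  have hpos : ∀ p ∈ PySem.List.enumerate reviews 0, 0 ≤ p.1 := by
    intro p hp
    rw [PySem.List.mem_enumerate_iff] at hp
    obtain ⟨k, hk, rfl⟩ := hp
    simp
  have houter := mainOuter labels (PySem.List.enumerate reviews) hpos (pvZD n W) hnd (pvNN_pvZD n W)
  dsimp only at houter
  rw [hinit, hwf0]
  rw [show (pvZD n W, pvZD n W, pvZD n W)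
      = (pvZD n W, pvMT labels (pvZD n W), pvMD labels (pvZD n W)) from by
    rw [pvMT_pvZD, pvMD_pvZD]]
  rw [houter]
  rfl
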